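-- pv_equiv track=rewrite | github.com/gregxsunday/filter-chrome-cache | filter_chrome_cache.py | extension_index
-- ===== SOURCE A (Python) =====
-- def extension_index(url):
--     extensions = ['.css', '.png', '.js', '.gif', '.jpg', '.do', '.html', '.jsp', '.min', '.ttf', '.woff', '.ico', '.aspx', '.txt']
--
--     end = len(url)
--     for ext in extensions:
--         index = url.find(ext)
--         if index != -1:
--             potential_end = index + len(ext)
--             end = min(potential_end, end)
--     return end
-- ===== SOURCE B (Python) =====
-- def extension_index(url):
--     extensions = ['.css', '.png', '.js', '.gif', '.jpg', '.do', '.html', '.jsp', '.min', '.ttf', '.woff', '.ico', '.aspx', '.txt']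
--     end = len(url)
--     for i in range(len(url)):
--         for ext in extensions:
--             if url.startswith(ext, i):
--                 end = min(end, i + len(ext))
--     return end
-- ===== Notes on version B (the rewrite author's own statement) =====
-- stated objective: alternative
-- what changed: Instead of calling url.find once per extension and combining first-occurrence ends, B scans every position i of the url and tests each extension with url.startswith(ext, i), keeping the minimal match end; equal because the first occurrence of an extension gives its smallest end.
import Mathlib
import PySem

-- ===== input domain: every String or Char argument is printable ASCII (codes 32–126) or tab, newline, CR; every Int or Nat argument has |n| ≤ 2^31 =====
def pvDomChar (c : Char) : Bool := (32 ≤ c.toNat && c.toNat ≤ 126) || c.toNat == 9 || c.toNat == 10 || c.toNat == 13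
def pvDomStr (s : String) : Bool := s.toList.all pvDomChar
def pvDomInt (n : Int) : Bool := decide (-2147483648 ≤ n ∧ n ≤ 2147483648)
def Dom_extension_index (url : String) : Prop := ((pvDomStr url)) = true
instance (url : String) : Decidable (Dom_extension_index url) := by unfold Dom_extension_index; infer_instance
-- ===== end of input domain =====

-- B replaces A's per-extension url.find scan by a position-by-position scan testing url.startswith(ext, i); alternative decomposition, same result.


-- ===== PORT A =====
def pvExtensions : List String := [".css", ".png", ".js", ".gif", ".jpg", ".do", ".html", ".jsp", ".min", ".ttf", ".woff", ".ico", ".aspx", ".txt"]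

def extension_index (url : String) : Int :=
  pvExtensions.foldl
    (fun end_ ext =>
      let index := PySem.Str.find url ext
      if index ≠ -1 then min (index + PySem.Str.len ext) end_ else end_)
    (PySem.Str.len url)

-- ===== PORT B =====
def extension_index_alt (url : String) : Int :=
  (PySem.List.pyRange 0 (PySem.Str.len url) 1).foldl
    (fun e i =>
      pvExtensions.foldl
        (fun e ext =>
          -- url.startswith(ext, i): exact as a prefix test on the dropped tail because 0 ≤ i < len(url) here
          if PySem.Chars.startswith (url.toList.drop i.toNat) ext.toList then min e (i + PySem.Str.len ext) else e)
        e)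
    (PySem.Str.len url)

-- ===== PRECONDITION & SPEC =====
def Spec_extension_index (url : String) (out : Int) : Prop := out = extension_index_alt url
instance (url : String) (out : Int) : Decidable (Spec_extension_index url out) := by unfold Spec_extension_index; infer_instance

-- ===== CLAIM (what is proved, stated in full; the proofs are below) =====
def Claim_equal_extension_index : Prop := ∀ (url : String), Dom_extension_index url → Spec_extension_index url (extension_index url)

-- ===== LEMMAS AND PROOFS =====

/-- The common loop shape: running minimum of `f x` over those `x ∈ L` with `p x`. -/
def pvG {α : Type} (L : List α) (p : α → Prop) [DecidablePred p] (f : α → Int) (init : Int) : Int :=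
  L.foldl (fun a x => if p x then min a (f x) else a) init

theorem pvG_nil {α : Type} (p : α → Prop) [DecidablePred p] (f : α → Int) (init : Int) :
    pvG [] p f init = init := rfl

theorem pvG_cons {α : Type} (x : α) (L : List α) (p : α → Prop) [DecidablePred p] (f : α → Int) (init : Int) :
    pvG (x :: L) p f init = pvG L p f (if p x then min init (f x) else init) := rfl

theorem pvG_le_init {α : Type} (L : List α) (p : α → Prop) [DecidablePred p] (f : α → Int) (init : Int) :
    pvG L p f init ≤ init := by
  induction L generalizing init with
  | nil => simp [pvG_nil]
  | cons x t ih =>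
    rw [pvG_cons]
    refine le_trans (ih _) ?_
    split_ifs <;> simp

theorem pvG_le {α : Type} (L : List α) (p : α → Prop) [DecidablePred p] (f : α → Int) (init : Int)
    (x : α) (hx : x ∈ L) (hp : p x) : pvG L p f init ≤ f x := by
  induction L generalizing init with
  | nil => cases hx
  | cons y t ih =>
    rw [pvG_cons]
    rcases List.mem_cons.mp hx with h | h
    · subst h
      refine le_trans (pvG_le_init _ _ _ _) ?_
      simp [if_pos hp]
    · exact ih _ h

theorem pvG_cases {α : Type} (L : List α) (p : α → Prop) [DecidablePred p] (f : α → Int) (init : Int) :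
    pvG L p f init = init ∨ ∃ x ∈ L, p x ∧ pvG L p f init = f x := by
  induction L generalizing init with
  | nil => exact Or.inl rfl
  | cons y t ih =>
    rw [pvG_cons]
    by_cases hp : p y
    · rw [if_pos hp]
      rcases ih (min init (f y)) with h | ⟨x, hx, hpx, hval⟩
      · rcases le_total init (f y) with hle | hle
        · rw [h, min_eq_left hle]; exact Or.inl rfl
        · rw [h, min_eq_right hle]; exact Or.inr ⟨y, List.mem_cons_self, hp, rfl⟩
      · exact Or.inr ⟨x, List.mem_cons_of_mem _ hx, hpx, hval⟩
    · rw [if_neg hp]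
      rcases ih init with h | ⟨x, hx, hpx, hval⟩
      · exact Or.inl h
      · exact Or.inr ⟨x, List.mem_cons_of_mem _ hx, hpx, hval⟩

/-- A's fold (min written the other way round) is a `pvG`. -/
theorem pvA_eq_pvG (url : String) :
    extension_index url =
      pvG pvExtensions (fun e => PySem.Str.find url e ≠ -1)
        (fun e => PySem.Str.find url e + PySem.Str.len e) (PySem.Str.len url) := by
  unfold extension_index
  generalize PySem.Str.len url = init
  induction pvExtensions generalizing init with
  | nil => rfl
  | cons y t ih =>
    simp only [List.foldl_cons, pvG_cons]
    rw [ih]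
    congr 1
    split_ifs <;> simp [min_comm]

theorem pvB_flat (url : String) (outer : List Int) (init : Int) :
    outer.foldl
      (fun e i =>
        pvExtensions.foldl
          (fun e ext =>
            if PySem.Chars.startswith (url.toList.drop i.toNat) ext.toList then min e (i + PySem.Str.len ext) else e)
          e)
      init =
    pvG (outer.flatMap (fun i => pvExtensions.map (fun e => (i, e))))
      (fun q => PySem.Chars.startswith (url.toList.drop q.1.toNat) q.2.toList = true)
      (fun q => q.1 + PySem.Str.len q.2) init := by
  induction outer generalizing init with
  | nil => rfl
  | cons i t ih =>
    simp only [List.foldl_cons, List.flatMap_cons]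
    rw [ih]
    unfold pvG
    rw [List.foldl_append, List.foldl_map]

/-- B's nested fold is a `pvG` over the flattened (position, extension) list. -/
theorem pvB_eq_pvG (url : String) :
    extension_index_alt url =
      pvG ((PySem.List.pyRange 0 (PySem.Str.len url) 1).flatMap
            (fun i => pvExtensions.map (fun e => (i, e))))
        (fun q => PySem.Chars.startswith (url.toList.drop q.1.toNat) q.2.toList = true)
        (fun q => q.1 + PySem.Str.len q.2) (PySem.Str.len url) := by
  unfold extension_index_alt
  exact pvB_flat url _ _

theorem pvExt_ne_nil : ∀ e ∈ pvExtensions, e.toList ≠ [] := by decide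

theorem pvLen_eq (s : String) : PySem.Str.len s = (s.toList.length : Int) := by
  simp [PySem.Str.len_eq]

theorem extension_index_eq_alt (url : String) : extension_index url = extension_index_alt url := by
  rw [pvA_eq_pvG, pvB_eq_pvG]
  have hfind : ∀ e : String, PySem.Str.find url e = PySem.Chars.find url.toList e.toList := by
    intro e; simp
  apply le_antisymm
  · -- A ≤ B
    rcases pvG_cases ((PySem.List.pyRange 0 (PySem.Str.len url) 1).flatMap
        (fun i => pvExtensions.map (fun e => (i, e))))
        (fun q => PySem.Chars.startswith (url.toList.drop q.1.toNat) q.2.toList = true)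
        (fun q => q.1 + PySem.Str.len q.2) (PySem.Str.len url) with h | ⟨q, hq, hpq, hval⟩
    · rw [h]; exact pvG_le_init _ _ _ _
    · rcases List.mem_flatMap.mp hq with ⟨i, hi, hqmem⟩
      rcases List.mem_map.mp hqmem with ⟨e, he, hqe⟩
      subst hqe
      have hi' := PySem.List.mem_pyRange_one.mp hi
      have hpre : e.toList <+: url.toList.drop i.toNat :=
        (PySem.Chars.startswith_iff _ _).mp hpq
      have hfound : PySem.Chars.find url.toList e.toList ≠ -1 := by
        rw [PySem.Chars.find_ne_neg_one_iff]
        exact (PySem.Chars.isIn_iff_infix _ _).mp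
          ((PySem.Chars.exists_prefix_drop_iff_isIn _ _).mp ⟨i.toNat, hpre⟩)
      have hge : -1 ≤ PySem.Chars.find url.toList e.toList := PySem.Chars.neg_one_le_find _ _
      have hpos : 0 ≤ PySem.Chars.find url.toList e.toList := by omega
      have hle : PySem.Chars.find url.toList e.toList ≤ i := by
        by_contra hlt
        push Not at hlt
        exact (PySem.Chars.find_spec hpos).2 i.toNat (by omega) hpre
      have hA := pvG_le pvExtensions (fun e => PySem.Str.find url e ≠ -1)
        (fun e => PySem.Str.find url e + PySem.Str.len e) (PySem.Str.len url) e he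
        (show PySem.Str.find url e ≠ -1 by rw [hfind]; exact hfound)
      rw [hval]
      simp only [hfind] at hA
      have hproj : ((i, e).1 : Int) + PySem.Str.len (i, e).2 = i + PySem.Str.len e := rfl
      rw [hproj]
      refine le_trans hA ?_
      omega
  · -- B ≤ A
    rcases pvG_cases pvExtensions (fun e => PySem.Str.find url e ≠ -1)
        (fun e => PySem.Str.find url e + PySem.Str.len e) (PySem.Str.len url) with h | ⟨e, he, hpe, hval⟩
    · rw [h]; exact pvG_le_init _ _ _ _
    · have hfound : PySem.Chars.find url.toList e.toList ≠ -1 := by rw [← hfind]; exact hpe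
      have hge : -1 ≤ PySem.Chars.find url.toList e.toList := PySem.Chars.neg_one_le_find _ _
      have hpos : 0 ≤ PySem.Chars.find url.toList e.toList := by omega
      obtain ⟨hpre, -⟩ := PySem.Chars.find_spec hpos
      have hne : e.toList ≠ [] := pvExt_ne_nil e he
      have hdrop_ne : url.toList.drop (PySem.Chars.find url.toList e.toList).toNat ≠ [] := by
        intro hnil
        rw [hnil] at hpre
        exact hne (List.prefix_nil.mp hpre)
      have hlt : (PySem.Chars.find url.toList e.toList).toNat < url.toList.length := by
        by_contra hge'
        push Not at hge'
        exact hdrop_ne (List.drop_eq_nil_of_le hge')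
      have hmem : (PySem.Chars.find url.toList e.toList, e) ∈
          (PySem.List.pyRange 0 (PySem.Str.len url) 1).flatMap
            (fun i => pvExtensions.map (fun e => (i, e))) := by
        refine List.mem_flatMap.mpr ⟨PySem.Chars.find url.toList e.toList, ?_, List.mem_map.mpr ⟨e, he, rfl⟩⟩
        rw [PySem.List.mem_pyRange_one, pvLen_eq]
        omega
      have hB := pvG_le _ (fun q : Int × String => PySem.Chars.startswith (url.toList.drop q.1.toNat) q.2.toList = true)
        (fun q => q.1 + PySem.Str.len q.2) (PySem.Str.len url) _ hmem
        (show PySem.Chars.startswith _ _ = true from (PySem.Chars.startswith_iff _ _).mpr hpre)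
      rw [hval, hfind]
      exact hB

-- ===== VERDICT (by name: the statement is the Claim_ definition above) =====
theorem extension_index_spec : Claim_equal_extension_index := by
  intro url _
  unfold Spec_extension_index
  exact extension_index_eq_alt url
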